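-- pv_equiv track=rewrite | github.com/rushilchugh/Practise | LongestContinuousIncreasingSubarray.py | longestContSubseq
-- ===== SOURCE A (Python) =====
-- def longestContSubseq(seqList):
--
--     S = [1 for _ in range(len(seqList))]
--
--     for i in range(1, len(seqList)):
--         if seqList[i] > seqList[i - 1]:
--             S[i] = S[i - 1] + 1
--
--         else:
--             S[i] = 1
--
--     return S
-- ===== SOURCE B (Python) =====
-- def longestContSubseq(seqList):
--     n = len(seqList)
--     starts = [i for i in range(n) if i == 0 or seqList[i] <= seqList[i - 1]]
--     bounds = starts + [n]
--     res = []
--     for s, e in zip(bounds, bounds[1:]):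
--         res.extend(range(1, e - s + 1))
--     return res
-- ===== Notes on version B (the rewrite author's own statement) =====
-- stated objective: alternative
-- what changed: Replaces A's per-index S[i]=S[i-1]+1 recurrence with a boundary-find-then-fill decomposition: one pass collects the start index of every strictly-increasing run, then each span [s,e) is filled with the enumeration 1..e-s.
import Mathlib
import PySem

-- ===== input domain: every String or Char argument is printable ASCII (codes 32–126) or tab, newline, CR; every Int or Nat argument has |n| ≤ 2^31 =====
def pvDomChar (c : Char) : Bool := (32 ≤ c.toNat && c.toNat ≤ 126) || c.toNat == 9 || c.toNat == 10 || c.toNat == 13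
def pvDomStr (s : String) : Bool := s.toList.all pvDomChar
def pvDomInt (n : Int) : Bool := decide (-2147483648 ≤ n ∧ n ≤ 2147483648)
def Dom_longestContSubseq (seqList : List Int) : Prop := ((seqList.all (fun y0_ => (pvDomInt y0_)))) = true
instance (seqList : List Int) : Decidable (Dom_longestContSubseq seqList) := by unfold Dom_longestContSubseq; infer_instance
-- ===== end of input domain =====

-- B replaces A's S[i]=S[i-1]+1 recurrence by a boundary-find-then-fill pass (collect run starts, then fill each run with 1..len); objective: alternative decomposition, same cost.

-- ===== PORT A =====
-- literal port of A: S = [1]*n, then for i in range(1, n): S[i] = S[i-1]+1 if seqList[i] > seqList[i-1] else 1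
def longestContSubseq (seqList : List Int) : List Int :=
  let S := (List.range seqList.length).map (fun _ => (1 : Int))
  (PySem.List.pyRange 1 (seqList.length : Int) 1).foldl
    (fun S i =>
      if PySem.List.pyGetD seqList (i - 1) 0 < PySem.List.pyGetD seqList i 0 then
        PySem.List.pySetD S i (PySem.List.pyGetD S (i - 1) 0 + 1)
      else
        PySem.List.pySetD S i 1) S

-- ===== PORT B =====
-- literal port of B: starts = boundary indices, bounds = starts + [n], fill each span with range(1, e-s+1)
def longestContSubseq_alt (seqList : List Int) : List Int :=
  let n : Int := seqList.length
  let starts := (PySem.List.pyRange 0 n 1).filter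
      (fun i => i == 0 || decide (PySem.List.pyGetD seqList i 0 ≤ PySem.List.pyGetD seqList (i - 1) 0))
  let bounds := starts ++ [n]
  (List.zip bounds (PySem.List.slice bounds (some 1) none)).foldl
    (fun res p => res ++ PySem.List.pyRange 1 (p.2 - p.1 + 1) 1) []

-- ===== PRECONDITION & SPEC =====
def Spec_longestContSubseq (seqList : List Int) (out : List Int) : Prop := out = longestContSubseq_alt seqList
instance (seqList : List Int) (out : List Int) : Decidable (Spec_longestContSubseq seqList out) := by unfold Spec_longestContSubseq; infer_instance

-- ===== CLAIM (what is proved, stated in full; the proofs are below) =====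
def Claim_equal_longestContSubseq : Prop := ∀ (seqList : List Int), Dom_longestContSubseq seqList → Spec_longestContSubseq seqList (longestContSubseq seqList)

-- ===== LEMMAS AND PROOFS =====

-- Both outputs have seq's length and satisfy the run-length recurrence, which determines them.
def Good (seq L : List Int) : Prop :=
  L.length = seq.length ∧
  ∀ j, j < seq.length →
    L.getD j 0 = if j = 0 then 1 else
      if seq.getD (j - 1) 0 < seq.getD j 0 then L.getD (j - 1) 0 + 1 else 1


theorem getD_set_ne (L : List Int) (m j : Nat) (v : Int) (h : j ≠ m) :
    (L.set m v).getD j 0 = L.getD j 0 := by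
  simp [List.getD_eq_getElem?_getD, List.getElem?_set_ne h.symm]

theorem getD_set_self (L : List Int) (m : Nat) (v : Int) (h : m < L.length) :
    (L.set m v).getD m 0 = v := by
  simp [List.getD_eq_getElem?_getD, h]

theorem loopA (seq : List Int) (m : Nat) (S : List Int)
    (h1 : 1 ≤ m) (hS : S.length = seq.length)
    (hrec : ∀ j, j < m → j < seq.length →
      S.getD j 0 = if j = 0 then 1 else
        if seq.getD (j - 1) 0 < seq.getD j 0 then S.getD (j - 1) 0 + 1 else 1)
    (hones : ∀ j, m ≤ j → j < seq.length → S.getD j 0 = 1) :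
    Good seq ((PySem.List.pyRange (m : Int) (seq.length : Int) 1).foldl
      (fun S i =>
        if PySem.List.pyGetD seq (i - 1) 0 < PySem.List.pyGetD seq i 0 then
          PySem.List.pySetD S i (PySem.List.pyGetD S (i - 1) 0 + 1)
        else
          PySem.List.pySetD S i 1) S) := by
  by_cases hend : seq.length ≤ m
  · rw [PySem.List.pyRange_one_eq_nil (by exact_mod_cast hend)]
    exact ⟨hS, fun j hj => hrec j (lt_of_lt_of_le hj hend) hj⟩
  · have hlt : m < seq.length := by omega
    rw [PySem.List.pyRange_one_cons (by exact_mod_cast hlt), List.foldl_cons]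
    have hm1 : (m : Int) - 1 = ((m - 1 : Nat) : Int) := by omega
    simp only [hm1, PySem.List.pyGetD_natCast, PySem.List.pySetD_natCast]
    rw [← apply_ite (fun x => S.set m x)]
    set v : Int := if seq.getD (m - 1) 0 < seq.getD m 0 then S.getD (m - 1) 0 + 1 else 1 with hv
    have hmS : m < S.length := by omega
    apply loopA seq (m + 1) (S.set m v) (by omega) (by simp [hS])
    · intro j hj hjn
      by_cases hjm : j = m
      · subst hjm
        rw [getD_set_self _ _ _ hmS, getD_set_ne _ _ _ _ (by omega)]
        have : ¬ j = 0 := by omega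
        simp only [this, if_false, hv]
      · have hjm' : j < m := by omega
        rw [getD_set_ne _ _ _ _ hjm]
        rcases Nat.eq_zero_or_pos j with h0 | h0
        · rw [hrec j hjm' hjn]; simp [h0]
        · rw [getD_set_ne _ _ _ _ (by omega), hrec j hjm' hjn]
    · intro j hj hjn
      rw [getD_set_ne _ _ _ _ (by omega)]
      exact hones j (by omega) hjn
termination_by seq.length - m
decreasing_by omega
theorem A_good_fold (seq : List Int) : Good seq
    ((PySem.List.pyRange 1 (seq.length : Int) 1).foldl
      (fun S i =>
        if PySem.List.pyGetD seq (i - 1) 0 < PySem.List.pyGetD seq i 0 then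
          PySem.List.pySetD S i (PySem.List.pyGetD S (i - 1) 0 + 1)
        else
          PySem.List.pySetD S i 1) ((List.range seq.length).map (fun _ => (1 : Int)))) := by
  have hinit : (List.range seq.length).map (fun _ => (1 : Int)) = List.replicate seq.length 1 := by
    simp [List.map_const']
  rw [hinit]
  have hrep : ∀ j, j < seq.length → (List.replicate seq.length (1:Int)).getD j 0 = 1 := by
    intro j hj
    simp [List.getD_eq_getElem?_getD, hj]
  exact loopA seq 1 _ le_rfl (by simp)
    (fun j hj hjn => by interval_cases j; simp [hjn])
    (fun j _ hjn => hrep j hjn)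


-- fill of the bounds list: each adjacent pair (s,e) contributes range(1, e-s+1)
def fill : List Int → List Int
  | x :: y :: t => PySem.List.pyRange 1 (y - x + 1) 1 ++ fill (y :: t)
  | _ => []

theorem foldl_zip_fill (bounds acc : List Int) :
    (List.zip bounds (bounds.drop 1)).foldl
      (fun res p => res ++ PySem.List.pyRange 1 (p.2 - p.1 + 1) 1) acc = acc ++ fill bounds := by
  induction bounds generalizing acc with
  | nil => simp [fill]
  | cons x t ih =>
    cases t with
    | nil => simp [fill]
    | cons y t' =>
      simp only [List.drop_succ_cons, List.drop_zero, List.zip_cons_cons, List.foldl_cons]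
      simp only [List.drop_succ_cons, List.drop_zero] at ih
      rw [ih]
      simp [fill, List.append_assoc]

theorem getD_pyRange_one (a b : Int) (j : Nat) (h : j < (b - a).toNat) :
    (PySem.List.pyRange a b 1).getD j 0 = a + j := by
  have hl : j < (PySem.List.pyRange a b 1).length := by
    rw [PySem.List.length_pyRange_one]; omega
  rw [List.getD_eq_getElem _ _ hl, PySem.List.getElem_pyRange_one]

theorem fill_good (seq : List Int) (t : List Int) (s : Int)
    (hs0 : 0 ≤ s) (hsn : s ≤ (seq.length : Int))
    (hmem : ∀ x ∈ t, s < x ∧ x < (seq.length : Int))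
    (hpw : t.Pairwise (· < ·))
    (hbd : ∀ x ∈ t, ¬ seq.getD (x - 1).toNat 0 < seq.getD x.toNat 0)
    (hnb : ∀ i : Int, s < i → i < (seq.length : Int) → i ∉ t →
        seq.getD (i - 1).toNat 0 < seq.getD i.toNat 0) :
    (fill (s :: (t ++ [(seq.length : Int)]))).length = ((seq.length : Int) - s).toNat ∧
    ∀ j : Nat, j < ((seq.length : Int) - s).toNat →
      (fill (s :: (t ++ [(seq.length : Int)]))).getD j 0 =
        if j = 0 then 1 else
          if seq.getD (s.toNat + j - 1) 0 < seq.getD (s.toNat + j) 0 then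
            (fill (s :: (t ++ [(seq.length : Int)]))).getD (j - 1) 0 + 1
          else 1 := by
  induction t generalizing s with
  | nil =>
    simp only [List.nil_append, fill, List.append_nil]
    constructor
    · rw [PySem.List.length_pyRange_one]; omega
    · intro j hj
      rw [getD_pyRange_one _ _ _ (by omega)]
      by_cases hj0 : j = 0
      · simp [hj0]
      · have hinc := hnb (s + j) (by omega) (by omega) (List.not_mem_nil)
        have h1 : (s + (j:Int) - 1).toNat = s.toNat + j - 1 := by omega
        have h2 : (s + (j:Int)).toNat = s.toNat + j := by omega
        rw [h1, h2] at hinc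
        rw [if_neg hj0, if_pos hinc, getD_pyRange_one _ _ _ (by omega)]
        omega
  | cons e t' ih =>
    have hse : s < e ∧ e < (seq.length : Int) := hmem e (List.mem_cons_self)
    have hmem' : ∀ x ∈ t', e < x ∧ x < (seq.length : Int) :=
      fun x hx => ⟨(List.pairwise_cons.mp hpw).1 x hx, (hmem x (List.mem_cons_of_mem _ hx)).2⟩
    have IH := ih e (by omega) (by omega) hmem' (List.pairwise_cons.mp hpw).2
      (fun x hx => hbd x (List.mem_cons_of_mem _ hx))
      (fun i hi1 hi2 hi3 => hnb i (by omega) hi2 (by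
        intro hmem2
        rcases List.mem_cons.mp hmem2 with h | h
        · omega
        · exact hi3 h))
    simp only [List.cons_append, fill] at IH ⊢
    set L2 := fill (e :: (t' ++ [(seq.length : Int)])) with hL2
    have hlen1 : (PySem.List.pyRange 1 (e - s + 1) 1).length = (e - s).toNat := by
      rw [PySem.List.length_pyRange_one]; omega
    have hlenInt : ((e:Int) - s).toNat + ((seq.length:Int) - e).toNat = ((seq.length:Int) - s).toNat := by omega
    constructor
    · rw [List.length_append, hlen1, IH.1]; omega
    · intro j hj
      by_cases hcase : j < (e - s).toNat
      · rw [List.getD_append _ _ _ _ (by omega), getD_pyRange_one _ _ _ (by omega)]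
        by_cases hj0 : j = 0
        · simp [hj0]
        · have hnotmem : (s + (j:Int)) ∉ e :: t' := by
            intro hmem2
            rcases List.mem_cons.mp hmem2 with h | h
            · omega
            · have := (hmem' _ h).1; omega
          have hinc := hnb (s + j) (by omega) (by omega) hnotmem
          have h1 : (s + (j:Int) - 1).toNat = s.toNat + j - 1 := by omega
          have h2 : (s + (j:Int)).toNat = s.toNat + j := by omega
          rw [h1, h2] at hinc
          rw [if_neg hj0, if_pos hinc, List.getD_append _ _ _ _ (by omega),
            getD_pyRange_one _ _ _ (by omega)]
          omega
      · have hge : (e - s).toNat ≤ j := by omega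
        rw [List.getD_append_right _ _ _ _ (by omega), hlen1]
        by_cases hj0 : j - (e - s).toNat = 0
        · -- j = (e-s).toNat, boundary at e
          have hL20 : L2.getD 0 0 = 1 := by simpa using IH.2 0 (by omega)
          rw [hj0, hL20]
          have hjne : ¬ j = 0 := by omega
          have hbde := hbd e (List.mem_cons_self)
          have h1 : (e - 1).toNat = s.toNat + j - 1 := by omega
          have h2 : e.toNat = s.toNat + j := by omega
          rw [h1, h2] at hbde
          rw [if_neg hjne, if_neg hbde]
        · have hj' : j - (e - s).toNat < ((seq.length:Int) - e).toNat := by omega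
          have hL2j := IH.2 (j - (e - s).toNat) hj'
          rw [if_neg hj0] at hL2j
          rw [hL2j]
          have h1 : e.toNat + (j - (e - s).toNat) - 1 = s.toNat + j - 1 := by omega
          have h2 : e.toNat + (j - (e - s).toNat) = s.toNat + j := by omega
          rw [h1, h2]
          have hjne : ¬ j = 0 := by omega
          rw [if_neg hjne]
          have hprev : L2.getD (j - (e - s).toNat - 1) 0 =
              (PySem.List.pyRange 1 (e - s + 1) 1 ++ L2).getD (j - 1) 0 := by
            rw [List.getD_append_right _ _ _ _ (by omega), hlen1]
            congr 1
            omega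
          rw [hprev]

theorem B_good_fold (seq : List Int) : Good seq
    ((List.zip ((PySem.List.pyRange 0 (seq.length : Int) 1).filter
        (fun i => i == 0 || decide (PySem.List.pyGetD seq i 0 ≤ PySem.List.pyGetD seq (i - 1) 0)) ++ [(seq.length : Int)])
      (PySem.List.slice ((PySem.List.pyRange 0 (seq.length : Int) 1).filter
        (fun i => i == 0 || decide (PySem.List.pyGetD seq i 0 ≤ PySem.List.pyGetD seq (i - 1) 0)) ++ [(seq.length : Int)]) (some 1) none)).foldl
      (fun res p => res ++ PySem.List.pyRange 1 (p.2 - p.1 + 1) 1) []) := by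
  set pred : Int → Bool := fun i => i == 0 || decide (PySem.List.pyGetD seq i 0 ≤ PySem.List.pyGetD seq (i - 1) 0) with hpred
  set bounds : List Int := (PySem.List.pyRange 0 (seq.length : Int) 1).filter pred ++ [(seq.length : Int)] with hbounds
  rw [PySem.List.slice_from _ (by norm_num)]
  rw [show ((1:Int).toNat) = 1 from rfl]
  rw [foldl_zip_fill, List.nil_append]
  by_cases hn : seq.length = 0
  · rw [hbounds, PySem.List.pyRange_one_eq_nil (by omega)]
    simp only [List.filter_nil, List.nil_append]
    exact ⟨by simp [fill, hn], fun j hj => by omega⟩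
  · have h0n : (0:Int) < (seq.length : Int) := by omega
    have hcons : bounds = 0 :: (((PySem.List.pyRange 1 (seq.length:Int) 1).filter pred) ++ [(seq.length : Int)]) := by
      rw [hbounds, PySem.List.pyRange_one_cons h0n, List.filter_cons_of_pos (by simp [hpred])]
      simp
    rw [hcons]
    set t : List Int := (PySem.List.pyRange 1 (seq.length:Int) 1).filter pred with ht
    have hmemt : ∀ x ∈ t, 1 ≤ x ∧ x < (seq.length:Int) ∧ pred x = true := by
      intro x hx
      rw [ht] at hx
      obtain ⟨h1, h2⟩ := List.mem_filter.mp hx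
      have := PySem.List.mem_pyRange_one.mp h1
      exact ⟨this.1, this.2, h2⟩
    have FG := fill_good seq t 0 le_rfl (by omega)
      (fun x hx => ⟨by have := (hmemt x hx).1; omega, (hmemt x hx).2.1⟩)
      ((PySem.List.pairwise_lt_pyRange_one 1 (seq.length:Int)).filter pred)
      (fun x hx => by
        obtain ⟨hx1, hx2, hx3⟩ := hmemt x hx
        rw [hpred] at hx3
        simp only [Bool.or_eq_true, beq_iff_eq, decide_eq_true_eq] at hx3
        rcases hx3 with h | h
        · omega
        · rw [PySem.List.pyGetD_of_nonneg _ _ (by omega), PySem.List.pyGetD_of_nonneg _ _ (by omega)] at h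
          omega)
      (fun i hi1 hi2 hi3 => by
        by_contra hnot
        apply hi3
        rw [ht]
        refine List.mem_filter.mpr ⟨PySem.List.mem_pyRange_one.mpr ⟨by omega, hi2⟩, ?_⟩
        rw [hpred]
        simp only [Bool.or_eq_true, beq_iff_eq, decide_eq_true_eq]
        right
        rw [PySem.List.pyGetD_of_nonneg _ _ (by omega), PySem.List.pyGetD_of_nonneg _ _ (by omega)]
        omega)
    refine ⟨by rw [FG.1]; omega, fun j hj => ?_⟩
    have := FG.2 j (by omega)
    simpa using this

theorem good_unique (seq L M : List Int) (hL : Good seq L) (hM : Good seq M) : L = M := by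
  obtain ⟨hLl, hLr⟩ := hL
  obtain ⟨hMl, hMr⟩ := hM
  have key : ∀ j, j < seq.length → L.getD j 0 = M.getD j 0 := by
    intro j
    induction j with
    | zero => intro h; rw [hLr 0 h, hMr 0 h]; simp
    | succ k ih =>
      intro h
      have hk : k < seq.length := Nat.lt_of_succ_lt h
      rw [hLr (k + 1) h, hMr (k + 1) h]
      simp only [Nat.add_sub_cancel]
      rw [ih hk]
  apply List.ext_getElem (by omega)
  intro i h1 h2
  rw [← List.getD_eq_getElem L 0 h1, ← List.getD_eq_getElem M 0 h2]
  exact key i (by omega)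

theorem A_good (seq : List Int) : Good seq (longestContSubseq seq) := by
  unfold longestContSubseq
  exact A_good_fold seq

theorem B_good (seq : List Int) : Good seq (longestContSubseq_alt seq) := by
  unfold longestContSubseq_alt
  exact B_good_fold seq

-- ===== VERDICT (by name: the statement is the Claim_ definition above) =====
theorem longestContSubseq_spec : Claim_equal_longestContSubseq := by
  intro seqList _
  unfold Spec_longestContSubseq
  exact good_unique seqList _ _ (A_good seqList) (B_good seqList)
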